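-- pv_equiv track=rewrite | github.com/dirizhablik/tabsly | src/guitartab_ai/notes.py | _bridge_short_gaps
-- ===== SOURCE A (Python) =====
-- from typing import Sequence
--
-- def _bridge_short_gaps(labels: Sequence[int | None], max_gap_frames: int) -> list[int | None]:
--     if max_gap_frames <= 0:
--         return list(labels)
--
--     bridged = list(labels)
--     index = 0
--     while index < len(bridged):
--         if bridged[index] is not None:
--             index += 1
--             continue
--         gap_start = index
--         while index < len(bridged) and bridged[index] is None:
--             index += 1
--         gap_end = index
--         gap_length = gap_end - gap_start
--         prev_label = bridged[gap_start - 1] if gap_start > 0 else None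
--         next_label = bridged[gap_end] if gap_end < len(bridged) else None
--         if 0 < gap_length <= max_gap_frames and prev_label is not None and prev_label == next_label:
--             for fill_index in range(gap_start, gap_end):
--                 bridged[fill_index] = prev_label
--     return bridged
-- ===== SOURCE B (Python) =====
-- from typing import Sequence
--
-- def _bridge_short_gaps(labels: Sequence[int | None], max_gap_frames: int) -> list[int | None]:
--     out = list(labels)
--     if max_gap_frames <= 0:
--         return out
--     anchors = [k for k, v in enumerate(labels) if v is not None]
--     for i, j in zip(anchors, anchors[1:]):
--         gap = j - i - 1
--         if 1 <= gap <= max_gap_frames and labels[i] == labels[j]: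
--             out[i + 1:j] = [labels[i]] * gap
--     return out
-- ===== Notes on version B (the rewrite author's own statement) =====
-- stated objective: alternative
-- what changed: B replaces A's in-place index/while sweep that detects and fills None runs with an anchor pass: it lists the non-None positions once and, for each consecutive anchor pair with equal labels at distance at most max_gap_frames+1, fills the region between them by slice assignment into a copy.
import Mathlib
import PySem

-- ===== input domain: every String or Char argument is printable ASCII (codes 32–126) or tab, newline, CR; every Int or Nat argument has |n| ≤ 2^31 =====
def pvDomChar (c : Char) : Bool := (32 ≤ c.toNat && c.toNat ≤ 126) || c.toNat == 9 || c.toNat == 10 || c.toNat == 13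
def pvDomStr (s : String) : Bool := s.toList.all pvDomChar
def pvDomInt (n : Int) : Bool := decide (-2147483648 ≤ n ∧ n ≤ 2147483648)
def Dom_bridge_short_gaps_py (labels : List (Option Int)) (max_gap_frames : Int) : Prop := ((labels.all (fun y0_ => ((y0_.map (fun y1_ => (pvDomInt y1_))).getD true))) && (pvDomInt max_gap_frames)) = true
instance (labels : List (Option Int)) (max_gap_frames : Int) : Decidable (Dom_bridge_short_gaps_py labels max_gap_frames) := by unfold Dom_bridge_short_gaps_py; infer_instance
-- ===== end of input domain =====

-- B replaces A's in-place index/while sweep over None runs by one pass over the list of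
-- non-None "anchor" positions, filling between consecutive equal anchors; same O(n) cost
-- (objective: alternative). A mutates its local copy only; neither touches the argument.

-- ===== PORT A =====
-- inner while: advance index while in range and bridged[index] is None
def skipNones (br : List (Option Int)) (i : Nat) : Nat :=
  if h : i < br.length ∧ br.getD i none = none then skipNones br (i + 1) else i
termination_by br.length - i
decreasing_by omega

-- for fill_index in range(gap_start, gap_end): bridged[fill_index] = prev_label
def aFill (br : List (Option Int)) (v : Option Int) (s e : Nat) : List (Option Int) :=
  (List.range' s (e - s)).foldl (fun b k => b.set k v) br

-- termination helpers for the outer while (cited by aLoop's decreasing_by)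
lemma foldl_set_length (v : Option Int) :
    ∀ (ks : List Nat) (br : List (Option Int)),
      (ks.foldl (fun b k => b.set k v) br).length = br.length := by
  intro ks
  induction ks with
  | nil => intro br; rfl
  | cons k ks ih => intro br; simpa [List.foldl_cons] using ih (br.set k v)

lemma aFill_length (br : List (Option Int)) (v : Option Int) (s e : Nat) :
    (aFill br v s e).length = br.length := foldl_set_length v _ br

lemma skipNones_facts_aux (br : List (Option Int)) :
    ∀ (m i : Nat), br.length - i ≤ m →
      i ≤ skipNones br i ∧ (i ≤ br.length → skipNones br i ≤ br.length) ∧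
      (∀ k, i ≤ k → k < skipNones br i → br.getD k none = none) ∧
      (skipNones br i < br.length → br.getD (skipNones br i) none ≠ none) := by
  intro m
  induction m with
  | zero =>
    intro i h
    rw [skipNones, dif_neg (by omega)]
    exact ⟨le_rfl, fun h2 => h2, fun k hk1 hk2 => absurd hk2 (by omega),
      fun h2 => absurd h2 (by omega)⟩
  | succ m ih =>
    intro i h
    by_cases hc : i < br.length ∧ br.getD i none = none
    · rw [skipNones, dif_pos hc]
      obtain ⟨g1, g2, g3, g4⟩ := ih (i + 1) (by omega)
      refine ⟨by omega, fun _ => g2 (by omega), fun k hk1 hk2 => ?_, g4⟩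
      rcases Nat.eq_or_lt_of_le hk1 with rfl | hk
      · exact hc.2
      · exact g3 k hk hk2
    · rw [skipNones, dif_neg hc]
      exact ⟨le_rfl, fun h2 => h2, fun k hk1 hk2 => absurd hk2 (by omega),
        fun h2 hc2 => hc ⟨h2, hc2⟩⟩

lemma skipNones_ge (br : List (Option Int)) (i : Nat) : i ≤ skipNones br i :=
  (skipNones_facts_aux br br.length i (by omega)).1

lemma skipNones_succ_le (br : List (Option Int)) (i : Nat)
    (h1 : i < br.length) (h2 : br.getD i none = none) : i + 1 ≤ skipNones br i := by
  rw [skipNones, dif_pos ⟨h1, h2⟩]; exact skipNones_ge br (i + 1)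

-- the outer while loop, state = (bridged, index)
def aLoop (mg : Int) (br : List (Option Int)) (index : Nat) : List (Option Int) :=
  if h : index < br.length then
    if hne : br.getD index none ≠ none then
      aLoop mg br (index + 1)
    else
      let gap_start := index
      let gap_end := skipNones br index
      let gap_length := gap_end - gap_start
      let prev_label : Option Int := if 0 < gap_start then br.getD (gap_start - 1) none else none
      let next_label : Option Int := if gap_end < br.length then br.getD gap_end none else none
      if 0 < gap_length ∧ (gap_length : Int) ≤ mg ∧ prev_label ≠ none ∧ prev_label = next_label then
        aLoop mg (aFill br prev_label gap_start gap_end) gap_end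
      else
        aLoop mg br gap_end
  else br
termination_by br.length - index
decreasing_by
  · omega
  · have := skipNones_succ_le br index h (by simpa using hne)
    simp only [aFill_length]
    omega
  · have := skipNones_succ_le br index h (by simpa using hne)
    omega

def bridge_short_gaps_py (labels : List (Option Int)) (max_gap_frames : Int) : List (Option Int) :=
  if max_gap_frames ≤ 0 then labels
  else aLoop max_gap_frames labels 0

-- ===== PORT B =====
-- anchors = [k for k, v in enumerate(labels) if v is not None]
def bAnchors (labels : List (Option Int)) : List Nat :=
  (List.range labels.length).filter (fun k => decide (labels.getD k none ≠ none))

-- loop body: for (i, j): if 1 <= gap <= max_gap_frames and labels[i] == labels[j]: out[i+1:j] = [labels[i]] * gap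
def bStep (labels : List (Option Int)) (mg : Int) (out : List (Option Int)) (ij : Nat × Nat) :
    List (Option Int) :=
  let gap := ij.2 - ij.1 - 1
  if 1 ≤ gap ∧ (gap : Int) ≤ mg ∧ labels.getD ij.1 none = labels.getD ij.2 none then
    out.take (ij.1 + 1) ++ List.replicate gap (labels.getD ij.1 none) ++ out.drop ij.2
  else out

def bridge_short_gaps_py_alt (labels : List (Option Int)) (max_gap_frames : Int) : List (Option Int) :=
  if max_gap_frames ≤ 0 then labels
  else
    let anchors := bAnchors labels
    (anchors.zip anchors.tail).foldl (bStep labels max_gap_frames) labels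

-- ===== PRECONDITION & SPEC =====
def Spec_bridge_short_gaps_py (labels : List (Option Int)) (max_gap_frames : Int) (out : List (Option Int)) : Prop := out = bridge_short_gaps_py_alt labels max_gap_frames
instance (labels : List (Option Int)) (max_gap_frames : Int) (out : List (Option Int)) : Decidable (Spec_bridge_short_gaps_py labels max_gap_frames out) := by unfold Spec_bridge_short_gaps_py; infer_instance

-- ===== CLAIM (what is proved, stated in full; the proofs are below) =====
def Claim_equal_bridge_short_gaps_py : Prop := ∀ (labels : List (Option Int)) (max_gap_frames : Int), Dom_bridge_short_gaps_py labels max_gap_frames → Spec_bridge_short_gaps_py labels max_gap_frames (bridge_short_gaps_py labels max_gap_frames)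

-- ===== LEMMAS AND PROOFS =====

-- the anchors of L at positions ≥ i
def anchorsFrom (L : List (Option Int)) (i : Nat) : List Nat :=
  (List.range' i (L.length - i)).filter (fun k => decide (L.getD k none ≠ none))

-- the anchor just left of position i, if it is adjacent
def prevOpt (L : List (Option Int)) (i : Nat) : List Nat :=
  if 0 < i ∧ L.getD (i - 1) none ≠ none then [i - 1] else []

-- B's fold over consecutive pairs, as a recursion on the anchor list
def gPairs (L : List (Option Int)) (mg : Int) : List Nat → List (Option Int) → List (Option Int)
  | a :: b :: rest, out => gPairs L mg (b :: rest) (bStep L mg out (a, b))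
  | _, out => out

lemma foldl_zip_eq_gPairs (L : List (Option Int)) (mg : Int) :
    ∀ (xs : List Nat) (out : List (Option Int)),
      (xs.zip xs.tail).foldl (bStep L mg) out = gPairs L mg xs out := by
  intro xs
  induction xs with
  | nil => intro out; simp [gPairs]
  | cons a t ih =>
    cases t with
    | nil => intro out; simp [gPairs]
    | cons b t' =>
      intro out
      simp only [List.tail_cons, List.zip_cons_cons, List.foldl_cons]
      rw [gPairs]
      exact ih (bStep L mg out (a, b))

lemma anchorsFrom_ge (L : List (Option Int)) (i : Nat) (h : L.length ≤ i) :
    anchorsFrom L i = [] := by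
  unfold anchorsFrom
  rw [Nat.sub_eq_zero_of_le h]
  rfl

lemma anchorsFrom_step (L : List (Option Int)) (i : Nat) (h : i < L.length) :
    anchorsFrom L i =
      (if L.getD i none ≠ none then [i] else []) ++ anchorsFrom L (i + 1) := by
  unfold anchorsFrom
  rw [show L.length - i = (L.length - (i + 1)) + 1 by omega, List.range'_succ, List.filter_cons]
  by_cases hi : L[i]?.getD none = none <;> simp [hi]

lemma anchorsFrom_of_none (L : List (Option Int)) :
    ∀ (d i : Nat), (∀ k, i ≤ k → k < i + d → L.getD k none = none) →
      anchorsFrom L i = anchorsFrom L (i + d) := by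
  intro d
  induction d with
  | zero => intro i _; rfl
  | succ d ih =>
    intro i hk
    by_cases hi : i < L.length
    · rw [anchorsFrom_step L i hi, if_neg (by simpa using hk i le_rfl (by omega))]
      rw [show i + (d + 1) = (i + 1) + d by omega]
      simpa using ih (i + 1) (fun k h1 h2 => hk k (by omega) (by omega))
    · rw [anchorsFrom_ge L i (by omega), anchorsFrom_ge L (i + (d + 1)) (by omega)]

lemma skipNones_le (br : List (Option Int)) (i : Nat) (h : i ≤ br.length) :
    skipNones br i ≤ br.length :=
  (skipNones_facts_aux br br.length i (by omega)).2.1 h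

lemma skipNones_none (br : List (Option Int)) (i : Nat) :
    ∀ k, i ≤ k → k < skipNones br i → br.getD k none = none :=
  (skipNones_facts_aux br br.length i (by omega)).2.2.1

lemma skipNones_stop (br : List (Option Int)) (i : Nat)
    (h : skipNones br i < br.length) : br.getD (skipNones br i) none ≠ none :=
  (skipNones_facts_aux br br.length i (by omega)).2.2.2 h

lemma skipNones_congr_aux (br L : List (Option Int)) (hlen : br.length = L.length) :
    ∀ (m i : Nat), br.length - i ≤ m →
      (∀ k, i ≤ k → br.getD k none = L.getD k none) → skipNones br i = skipNones L i := by
  intro m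
  induction m with
  | zero =>
    intro i h h2
    rw [show skipNones br i = i from by rw [skipNones, dif_neg (by rintro ⟨a, -⟩; omega)],
      show skipNones L i = i from by rw [skipNones, dif_neg (by rintro ⟨a, -⟩; omega)]]
  | succ m ih =>
    intro i h h2
    by_cases hc : i < br.length ∧ br.getD i none = none
    · rw [show skipNones br i = skipNones br (i + 1) from by rw [skipNones, dif_pos hc],
        show skipNones L i = skipNones L (i + 1) from by
          rw [skipNones, dif_pos ⟨by omega, by rw [← h2 i le_rfl]; exact hc.2⟩]]
      exact ih (i + 1) (by omega) (fun k hk => h2 k (by omega))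
    · rw [show skipNones br i = i from by rw [skipNones, dif_neg hc],
        show skipNones L i = i from by
          rw [skipNones, dif_neg (fun hc2 => hc ⟨by omega, by rw [h2 i le_rfl]; exact hc2.2⟩)]]

lemma skipNones_congr (br L : List (Option Int)) (hlen : br.length = L.length) (i : Nat)
    (h2 : ∀ k, i ≤ k → br.getD k none = L.getD k none) : skipNones br i = skipNones L i :=
  skipNones_congr_aux br L hlen br.length i (by omega) h2

lemma getD_eq_getElem?_getD' (l : List (Option Int)) (k : Nat) :
    l.getD k none = (l[k]?).getD none := List.getD_eq_getElem?_getD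

lemma foldl_set_getD_outside (v : Option Int) (c : Nat) :
    ∀ (ks : List Nat) (br : List (Option Int)), (∀ j ∈ ks, j ≠ c) →
      (ks.foldl (fun b k => b.set k v) br).getD c none = br.getD c none := by
  intro ks
  induction ks with
  | nil => intro br _; rfl
  | cons k ks ih =>
    intro br h
    rw [List.foldl_cons, ih (br.set k v) (fun j hj => h j (List.mem_cons_of_mem _ hj)),
      getD_eq_getElem?_getD', getD_eq_getElem?_getD',
      List.getElem?_set_ne (h k (List.mem_cons_self))]

lemma aFill_getD_outside (br : List (Option Int)) (v : Option Int) (s e c : Nat)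
    (h : c < s ∨ e ≤ c) : (aFill br v s e).getD c none = br.getD c none := by
  apply foldl_set_getD_outside
  intro j hj
  have := List.mem_range'_1.mp hj
  omega

lemma aFill_eq_slice (v : Option Int) :
    ∀ (m s : Nat) (br : List (Option Int)), s + m ≤ br.length →
      (List.range' s m).foldl (fun b k => b.set k v) br =
        br.take s ++ List.replicate m v ++ br.drop (s + m) := by
  intro m
  induction m with
  | zero => intro s br _; simp
  | succ m ih =>
    intro s br h
    rw [List.range'_succ, List.foldl_cons]
    have hs : s < br.length := by omega
    rw [ih (s + 1) (br.set s v) (by simp; omega)]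
    rw [List.drop_set_of_lt (by omega : s < s + 1 + m)]
    have hset : (br.set s v).take (s + 1) = br.take s ++ [v] := by
      rw [List.set_eq_take_cons_drop v hs, List.take_append]
      rw [List.take_of_length_le (le_trans (List.length_take_le _ _) (by omega))]
      rw [List.length_take_of_le (by omega)]
      simp
    rw [hset]
    simp [List.replicate_succ, show s + 1 + m = s + (m + 1) by omega]

lemma aFill_slice (br : List (Option Int)) (v : Option Int) (s e : Nat)
    (hse : s ≤ e) (he : e ≤ br.length) :
    aFill br v s e = br.take s ++ List.replicate (e - s) v ++ br.drop e := by
  unfold aFill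
  rw [aFill_eq_slice v (e - s) s br (by omega), show s + (e - s) = e by omega]

-- Main lemma: from any loop state (br, index) whose suffix (and the cell just left of a
-- None at index) still agrees with the original labels L, A's loop computes exactly B's
-- fold over the remaining consecutive-anchor pairs (with the adjacent left anchor carried).
lemma aLoop_eq_gPairs (L : List (Option Int)) (mg : Int) :
    ∀ (m i : Nat) (br : List (Option Int)), L.length - i ≤ m → br.length = L.length →
      (∀ k, i ≤ k → br.getD k none = L.getD k none) →
      (br.getD i none = none → 0 < i → br.getD (i - 1) none = L.getD (i - 1) none) →
      aLoop mg br i = gPairs L mg (prevOpt L i ++ anchorsFrom L i) br := by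
  intro m
  induction m with
  | zero =>
    intro i br hm h1 h2 h3
    rw [aLoop, dif_neg (by omega : ¬ i < br.length), anchorsFrom_ge L i (by omega)]
    unfold prevOpt; split <;> simp [gPairs]
  | succ m ih =>
    intro i br hm h1 h2 h3
    by_cases hi : i < br.length
    · rw [aLoop, dif_pos hi]
      by_cases hne : br.getD i none ≠ none
      · -- anchor at i: step to i+1
        rw [dif_pos hne]
        have hLi : L.getD i none ≠ none := by rw [← h2 i le_rfl]; exact hne
        rw [ih (i + 1) br (by omega) h1 (fun k hk => h2 k (by omega))
          (fun _ _ => by simpa using h2 i le_rfl)]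
        rw [anchorsFrom_step L i (by omega), if_pos hLi]
        have hp1 : prevOpt L (i + 1) = [i] := by
          unfold prevOpt
          rw [if_pos ⟨by omega, by simpa using hLi⟩]
          simp
        rw [hp1]
        unfold prevOpt
        split
        · -- left-adjacent anchor i-1: the pair (i-1, i) has gap 0, bStep is id
          rename_i hpo
          simp only [List.singleton_append]
          rw [gPairs]
          have : bStep L mg br (i - 1, i) = br := by
            unfold bStep
            rw [if_neg (by intro hc; omega)]
          rw [this]
        · rfl
      · -- None run starting at i
        rw [dif_neg hne]
        simp only [not_not] at hne
        set e := skipNones br i with he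
        have heL : skipNones L i = e := (skipNones_congr br L h1 i h2).symm
        have hie : i + 1 ≤ e := skipNones_succ_le br i hi hne
        have hen : e ≤ br.length := skipNones_le br i (by omega)
        have hnone : ∀ k, i ≤ k → k < e → L.getD k none = none := fun k hk1 hk2 => by
          rw [← h2 k hk1]; exact skipNones_none br i k hk1 hk2
        have hstop : e < br.length → L.getD e none ≠ none := fun hlt => by
          rw [← h2 e (by omega)]; exact skipNones_stop br i hlt
        have hanch : anchorsFrom L i = anchorsFrom L e := by
          have := anchorsFrom_of_none L (e - i) i
            (fun k hk1 hk2 => hnone k hk1 (by omega))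
          rwa [show i + (e - i) = e by omega] at this
        set P : Option Int := if 0 < i then br.getD (i - 1) none else none with hP
        set N : Option Int := if e < br.length then br.getD e none else none with hN
        by_cases hc : 0 < e - i ∧ ((e - i : Nat) : Int) ≤ mg ∧ P ≠ none ∧ P = N
        · -- fill branch
          rw [if_pos hc]
          obtain ⟨hc1, hc2, hc3, hc4⟩ := hc
          have hipos : 0 < i := by
            by_contra h0
            exact hc3 (by simp [hP, Nat.le_zero.mp (Nat.not_lt.mp h0)] )
          have hprev : P = L.getD (i - 1) none := by
            rw [hP, if_pos hipos]; exact h3 hne hipos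
          have heln : e < br.length := by
            by_contra hge
            exact hc3 (hc4.trans (by rw [hN, if_neg hge]))
          have hNe : N = L.getD e none := by rw [hN, if_pos heln]; exact h2 e (by omega)
          have hLe : L.getD (i - 1) none = L.getD e none := by rw [← hprev, ← hNe]; exact hc4
          have hLprev : L.getD (i - 1) none ≠ none := by rw [← hprev]; exact hc3
          -- invariant for the new state
          have ihs := ih e (aFill br P i e) (by omega)
            (by rw [aFill_length]; exact h1)
            (fun k hk => by
              rw [aFill_getD_outside br P i e k (Or.inr hk)]; exact h2 k (by omega))
            (fun hcontra _ => by
              rw [aFill_getD_outside br P i e e (Or.inr le_rfl)] at hcontra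
              exact absurd (by rw [← h2 e (by omega)]; exact hcontra) (hstop heln))
          rw [ihs, hanch]
          rw [anchorsFrom_step L e (by omega), if_pos (hstop heln)]
          have hpe : prevOpt L e = [] := by
            unfold prevOpt
            rw [if_neg (by
              rintro ⟨_, hcon⟩
              exact hcon (hnone (e - 1) (by omega) (by omega)))]
          have hpi : prevOpt L i = [i - 1] := by
            unfold prevOpt; rw [if_pos ⟨hipos, hLprev⟩]
          rw [hpe, hpi]
          simp only [List.singleton_append, List.nil_append]
          rw [gPairs]
          have hbs : bStep L mg br (i - 1, e) = aFill br P i e := by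
            unfold bStep
            simp only
            rw [show e - (i - 1) - 1 = e - i by omega]
            rw [if_pos ⟨by omega, hc2, hLe⟩]
            rw [aFill_slice br P i e (by omega) (by omega), hprev,
              show i - 1 + 1 = i by omega]
          rw [hbs]
        · -- no fill
          rw [if_neg hc]
          have ihs := ih e br (by omega) h1 (fun k hk => h2 k (by omega))
            (fun _ _ => h2 (e - 1) (by omega))
          rw [ihs, hanch]
          have hpe : prevOpt L e = [] := by
            unfold prevOpt
            rw [if_neg (by
              rintro ⟨_, hcon⟩
              exact hcon (hnone (e - 1) (by omega) (by omega)))]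
          rw [hpe]
          unfold prevOpt
          split
          · rename_i hpo
            obtain ⟨hipos, hLprev⟩ := hpo
            have hprev : P = L.getD (i - 1) none := by
              rw [hP, if_pos hipos]; exact h3 hne hipos
            by_cases heln : e < br.length
            · rw [anchorsFrom_step L e (by omega), if_pos (hstop heln)]
              simp only [List.singleton_append, List.nil_append]
              rw [gPairs]
              have hbs : bStep L mg br (i - 1, e) = br := by
                unfold bStep
                simp only
                rw [show e - (i - 1) - 1 = e - i by omega]
                rw [if_neg (by
                  rintro ⟨_, hg2, hg3⟩
                  exact hc ⟨by omega, hg2, by rw [hprev]; exact hLprev, by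
                    rw [hprev, hN, if_pos heln, h2 e (by omega)]; exact hg3⟩)]
              rw [hbs]
            · rw [anchorsFrom_ge L e (by omega)]
              simp [gPairs]
          · rfl
    · rw [aLoop, dif_neg hi, anchorsFrom_ge L i (by omega)]
      unfold prevOpt; split <;> simp [gPairs]

lemma bAnchors_eq_anchorsFrom (L : List (Option Int)) : bAnchors L = anchorsFrom L 0 := by
  unfold bAnchors anchorsFrom
  rw [List.range_eq_range']
  rfl

-- ===== VERDICT (by name: the statement is the Claim_ definition above) =====
theorem bridge_short_gaps_py_spec : Claim_equal_bridge_short_gaps_py := by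
  intro labels mg _
  unfold Spec_bridge_short_gaps_py bridge_short_gaps_py bridge_short_gaps_py_alt
  by_cases h0 : mg ≤ 0
  · rw [if_pos h0, if_pos h0]
  · rw [if_neg h0, if_neg h0]
    simp only
    rw [foldl_zip_eq_gPairs, bAnchors_eq_anchorsFrom]
    have := aLoop_eq_gPairs labels mg labels.length 0 labels (by omega) rfl
      (fun _ _ => rfl) (fun _ h => absurd h (by omega))
    rw [this]
    unfold prevOpt
    rw [if_neg (by rintro ⟨h, _⟩; omega)]
    rfl
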